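-- pv_equiv track=rewrite | github.com/GraysonNocera/bois | bois_optimized.py | boi_not_in_week
-- ===== SOURCE A (Python) =====
-- bois = [
--     "Grayson",
--     "Jacob",
--     "Matt",
--     "Yoder",
--     "Ben",
--     "David",
--     "Stephen",
--     "Joe",
--     "Parker",
--     "Dutch",
--     "Jared",
--     "Isaac",
--     "Chuck",
--     "Christian",
--     "Ken",
-- ]
--
-- def boi_not_in_week(week: list, num_bois: int = 1) -> str:
--     """
--     Find the boi that is not in the week, assuming only one
--     :param week: pairings for a week
--     :return: string of boi not in list
--     """
--
--     temp_bois = bois.copy()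
--     for pair in week:
--         for boi in pair:
--             try:
--                 temp_bois.remove(boi)
--             except:
--                 pass # boi in question is a little_boi, so not in temp_bois
--     return temp_bois[0:num_bois]
-- ===== SOURCE B (Python) =====
-- bois = [
--     "Grayson",
--     "Jacob",
--     "Matt",
--     "Yoder",
--     "Ben",
--     "David",
--     "Stephen",
--     "Joe",
--     "Parker",
--     "Dutch",
--     "Jared",
--     "Isaac",
--     "Chuck",
--     "Christian",
--     "Ken",
-- ]
--
-- def boi_not_in_week(week: list, num_bois: int = 1) -> str:
--     # Pass 1: index every name appearing in the week's pairings.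
--     seen = {name for pair in week for name in pair}
--     # Pass 2: keep the bois not seen, in order, then take the requested count.
--     return [b for b in bois if b not in seen][:num_bois]
-- ===== Notes on version B (the rewrite author's own statement) =====
-- stated objective: faster
-- what changed: Replaces A's per-name try/except list.remove on a mutable copy of bois with one pass building a set of seen names plus one filtering pass over bois.
import Mathlib
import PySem

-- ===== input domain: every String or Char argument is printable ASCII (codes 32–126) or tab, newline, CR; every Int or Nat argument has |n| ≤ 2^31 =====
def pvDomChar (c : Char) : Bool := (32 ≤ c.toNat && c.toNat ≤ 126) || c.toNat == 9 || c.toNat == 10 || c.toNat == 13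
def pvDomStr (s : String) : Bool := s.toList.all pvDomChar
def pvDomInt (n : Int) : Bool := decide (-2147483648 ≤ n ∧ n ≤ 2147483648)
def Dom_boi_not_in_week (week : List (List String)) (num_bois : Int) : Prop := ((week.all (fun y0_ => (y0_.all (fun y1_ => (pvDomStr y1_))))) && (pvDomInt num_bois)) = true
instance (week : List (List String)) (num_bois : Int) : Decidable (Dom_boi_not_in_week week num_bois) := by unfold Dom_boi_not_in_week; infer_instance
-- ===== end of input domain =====

-- B replaces A's repeated try/except list.remove on a copy of bois by one set-building
-- pass over the week plus one filtering pass over bois (measured faster in a timing run).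

-- the module-level constant 'bois'
def pvBois : List String :=
  ["Grayson", "Jacob", "Matt", "Yoder", "Ben", "David", "Stephen", "Joe",
   "Parker", "Dutch", "Jared", "Isaac", "Chuck", "Christian", "Ken"]

-- ===== PORT A =====
def boi_not_in_week (week : List (List String)) (num_bois : Int) : List String :=
  let temp_bois := week.foldl (fun temp pair =>
    pair.foldl (fun t boi =>
      match PySem.List.remove? t boi with   -- try: temp_bois.remove(boi) except: pass
      | some t' => t'
      | none => t) temp) pvBois
  PySem.List.slice temp_bois (some 0) (some num_bois)   -- temp_bois[0:num_bois]

-- ===== PORT B =====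
def boi_not_in_week_alt (week : List (List String)) (num_bois : Int) : List String :=
  -- seen = {name for pair in week for name in pair}
  let seen : PySem.Set String := week.foldl (fun s pair => pair.foldl PySem.Set.add s) PySem.Set.empty
  -- [b for b in bois if b not in seen][:num_bois]
  PySem.List.slice (pvBois.filter (fun b => !(PySem.Set.contains seen b))) (some 0) (some num_bois)

-- ===== PRECONDITION & SPEC =====
def Spec_boi_not_in_week (week : List (List String)) (num_bois : Int) (out : List String) : Prop := out = boi_not_in_week_alt week num_bois
instance (week : List (List String)) (num_bois : Int) (out : List String) : Decidable (Spec_boi_not_in_week week num_bois out) := by unfold Spec_boi_not_in_week; infer_instance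

-- ===== CLAIM (what is proved, stated in full; the proofs are below) =====
def Claim_equal_boi_not_in_week : Prop := ∀ (week : List (List String)) (num_bois : Int), Dom_boi_not_in_week week num_bois → Spec_boi_not_in_week week num_bois (boi_not_in_week week num_bois)

-- ===== LEMMAS AND PROOFS =====

-- a nested fold over the pairs is a fold over the flattened name list
theorem foldl_nested_flatMap {α : Type} (step : α → String → α)
    (week : List (List String)) (init : α) :
    week.foldl (fun t pair => pair.foldl step t) init
      = (week.flatMap id).foldl step init := by
  induction week generalizing init with
  | nil => rfl
  | cons p w ih => simp [List.flatMap_cons, List.foldl_append, ih]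

-- one try/except remove on a duplicate-free list is a filter
theorem remove_getD_eq_filter (l : List String) (a : String) (h : l.Nodup) :
    (match PySem.List.remove? l a with
     | some t' => t'
     | none => l) = l.filter (fun b => !(b == a)) := by
  by_cases hm : a ∈ l
  · rw [PySem.List.remove?_eq_some_erase l a hm, List.Nodup.erase_eq_filter h]
    apply List.filter_congr
    intro b _
    simp [bne]
  · rw [(PySem.List.remove?_eq_none_iff l a).mpr hm]
    symm
    apply List.filter_eq_self.mpr
    intro b hb
    have hba : b ≠ a := fun hba => hm (hba ▸ hb)
    simp [hba]

-- folding try/except removes over the names = filtering out the names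
theorem foldl_remove_eq_filter (ns : List String) (l : List String) (h : l.Nodup) :
    ns.foldl (fun t boi =>
      match PySem.List.remove? t boi with
      | some t' => t'
      | none => t) l = l.filter (fun b => !(ns.contains b)) := by
  induction ns generalizing l with
  | nil => simp
  | cons n ns ih =>
    rw [List.foldl_cons, remove_getD_eq_filter l n h,
        ih _ (h.filter _), List.filter_filter]
    apply List.filter_congr
    intro b _
    by_cases hbn : b = n <;> simp [hbn]

-- membership in the built set is membership in the flattened name list
theorem contains_seen (ns : List String) (b : String) :
    PySem.Set.contains (PySem.Set.ofList ns) b = ns.contains b := by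
  rw [PySem.Set.contains_eq_listContains]
  by_cases h : b ∈ ns <;>
    simp [h, PySem.Set.mem_ofList]

-- ===== VERDICT (by name: the statement is the Claim_ definition above) =====
theorem boi_not_in_week_spec : Claim_equal_boi_not_in_week := by
  intro week num_bois _
  have hnd : pvBois.Nodup := by decide
  simp only [Spec_boi_not_in_week, boi_not_in_week, boi_not_in_week_alt, PySem.Set.empty]
  rw [foldl_nested_flatMap, foldl_nested_flatMap,
      foldl_remove_eq_filter _ _ hnd, ← PySem.Set.ofList_eq_foldl,
      funext (contains_seen (week.flatMap id))]
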